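-- pv_equiv track=rewrite | github.com/Daki404/B.O.J-ps | 12851.py | bfs
-- ===== SOURCE A (Python) =====
-- from collections import deque
--
-- def bfs(st, ed):
--     visit = [-1] * 100001
--     cnt = [0] * 100001
--     visit[st], cnt[st] = 0, 1
--     queue = deque([st])
--
--     while queue:
--         v = queue.popleft()
--         for i in (1, -1, v):
--             new_v = v + i
--             if 0 > new_v or new_v > 100000: continue
--             if visit[new_v] == - 1:
--                 visit[new_v] = visit[v] + 1
--                 cnt[new_v] = cnt[v]
--                 queue.append(new_v)
--             elif visit[new_v] == visit[v] + 1: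
--                 cnt[new_v] += cnt[v]
--     return visit[ed], cnt[ed]
-- ===== SOURCE B (Python) =====
-- from collections import deque
--
-- def bfs(st, ed):
--     # pass 1: plain BFS — distances and pop order only
--     visit = [-1] * 100001
--     visit[st] = 0
--     order = []
--     queue = deque([st])
--     while queue:
--         v = queue.popleft()
--         order.append(v)
--         for nv in (v + 1, v - 1, v + v):
--             if 0 <= nv <= 100000 and visit[nv] == -1:
--                 visit[nv] = visit[v] + 1
--                 queue.append(nv)
--     # pass 2: propagate shortest-path counts along the recorded order
--     cnt = [0] * 100001
--     cnt[st] = 1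
--     for v in order:
--         for nv in (v + 1, v - 1, v + v):
--             if 0 <= nv <= 100000 and visit[nv] == visit[v] + 1:
--                 cnt[nv] += cnt[v]
--     return visit[ed], cnt[ed]
-- ===== Notes on version B (the rewrite author's own statement) =====
-- stated objective: alternative
-- what changed: B splits A's fused loop into two passes: a plain BFS that records distances and the pop order, then a separate sweep over that order that propagates shortest-path counts using the final distance table.
import Mathlib
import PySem

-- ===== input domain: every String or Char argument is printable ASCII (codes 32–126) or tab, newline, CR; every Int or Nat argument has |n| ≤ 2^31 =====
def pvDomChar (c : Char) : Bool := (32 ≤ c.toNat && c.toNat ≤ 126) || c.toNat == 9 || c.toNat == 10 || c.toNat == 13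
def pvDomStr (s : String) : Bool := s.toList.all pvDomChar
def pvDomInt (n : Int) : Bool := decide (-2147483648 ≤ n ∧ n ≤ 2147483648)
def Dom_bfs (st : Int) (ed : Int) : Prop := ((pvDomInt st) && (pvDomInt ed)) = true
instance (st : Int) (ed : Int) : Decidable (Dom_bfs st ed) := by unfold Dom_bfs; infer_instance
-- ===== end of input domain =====

-- B re-implements A as two passes (plain BFS recording pop order, then a count sweep over that
-- order); same results, same cost — objective: alternative decomposition.

-- ===== PORT A =====
-- Python list indexing for the length-100001 tables, exact for -100001 ≤ i ≤ 100000
-- (negative indices wrap, as in Python); both ports use the same tables.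
def ixN (i : Int) : Nat := (if i < 0 then i + 100001 else i).toNat
def aget (a : Array Int) (i : Int) : Int := a.getD (ixN i) 0
def aset (a : Array Int) (i : Int) (x : Int) : Array Int := a.setIfInBounds (ixN i) x

-- body of A's `for i in (1, -1, v)` for one offset i (new_v = v + i)
def stepA (v i : Int) (s : Array Int × Array Int × List Int) : Array Int × Array Int × List Int :=
  let new_v := v + i
  if 0 > new_v ∨ new_v > 100000 then s
  else if aget s.1 new_v = -1 then
    (aset s.1 new_v (aget s.1 v + 1), aset s.2.1 new_v (aget s.2.1 v), new_v :: s.2.2)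
  else if aget s.1 new_v = aget s.1 v + 1 then
    (s.1, aset s.2.1 new_v (aget s.2.1 new_v + aget s.2.1 v), s.2.2)
  else s

-- A's `while queue` loop; the deque is (front, back) with pops from `front` and
-- appends consed onto `back` (refilled by reversal), fuel only makes it total.
def loopA (fuel : Nat) (visit cnt : Array Int) (front back : List Int) : Array Int × Array Int :=
  match fuel with
  | 0 => (visit, cnt)
  | fuel + 1 =>
    match front with
    | v :: f =>
      let s := stepA v v (stepA v (-1) (stepA v 1 (visit, cnt, back)))
      loopA fuel s.1 s.2.1 f s.2.2
    | [] =>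
      match back with
      | [] => (visit, cnt)
      | _ :: _ => loopA fuel visit cnt back.reverse []

def bfs (st : Int) (ed : Int) : Int × Int :=
  let visit := aset (Array.replicate 100001 (-1)) st 0
  let cnt := aset (Array.replicate 100001 0) st 1
  let r := loopA 1000000 visit cnt [st] []
  (aget r.1 ed, aget r.2 ed)

-- ===== PORT B =====
-- body of B's first-pass `for nv in (v+1, v-1, v+v)` for one neighbour nv
def step1 (v nv : Int) (s : Array Int × List Int) : Array Int × List Int :=
  if 0 ≤ nv ∧ nv ≤ 100000 ∧ aget s.1 nv = -1 then
    (aset s.1 nv (aget s.1 v + 1), nv :: s.2)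
  else s

-- B's first pass: plain BFS, recording the pop order (accumulated reversed, then reversed once)
def loop1 (fuel : Nat) (visit : Array Int) (front back acc : List Int) : Array Int × List Int :=
  match fuel with
  | 0 => (visit, acc.reverse)
  | fuel + 1 =>
    match front with
    | v :: f =>
      let s := step1 v (v + v) (step1 v (v - 1) (step1 v (v + 1) (visit, back)))
      loop1 fuel s.1 f s.2 (v :: acc)
    | [] =>
      match back with
      | [] => (visit, acc.reverse)
      | _ :: _ => loop1 fuel visit back.reverse [] acc

-- body of B's second-pass inner loop for one neighbour nv
def step2 (visitF : Array Int) (v : Int) (cnt : Array Int) (nv : Int) : Array Int :=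
  if 0 ≤ nv ∧ nv ≤ 100000 ∧ aget visitF nv = aget visitF v + 1 then
    aset cnt nv (aget cnt nv + aget cnt v)
  else cnt

-- B's second pass: sweep the pop order, propagating counts
def pass2 (visitF : Array Int) (cnt : Array Int) (order : List Int) : Array Int :=
  order.foldl (fun c v => step2 visitF v (step2 visitF v (step2 visitF v c (v + 1)) (v - 1)) (v + v)) cnt

def bfs_alt (st : Int) (ed : Int) : Int × Int :=
  let visit := aset (Array.replicate 100001 (-1)) st 0
  let r := loop1 1000000 visit [st] [] []
  let cnt := aset (Array.replicate 100001 0) st 1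
  let cntF := pass2 r.1 cnt r.2
  (aget r.1 ed, aget cntF ed)

-- ===== PRECONDITION & SPEC =====
-- Pre_ excludes exactly the indices outside -100001..100000, where Python A raises IndexError.
def Pre_bfs (st : Int) (ed : Int) : Prop :=
  -100001 ≤ st ∧ st ≤ 100000 ∧ -100001 ≤ ed ∧ ed ≤ 100000
instance (st : Int) (ed : Int) : Decidable (Pre_bfs st ed) := by unfold Pre_bfs; infer_instance
def pvWitness_bfs : Int × Int := (5, 17)

def Spec_bfs (st : Int) (ed : Int) (out : Int × Int) : Prop := out = bfs_alt st ed
instance (st : Int) (ed : Int) (out : Int × Int) : Decidable (Spec_bfs st ed out) := by unfold Spec_bfs; infer_instance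

-- ===== CLAIM (what is proved, stated in full; the proofs are below) =====
def Claim_equal_bfs : Prop := ∀ (st : Int) (ed : Int), Dom_bfs st ed → Pre_bfs st ed → Spec_bfs st ed (bfs st ed)

-- ===== LEMMAS AND PROOFS =====

-- `b` agrees with `a` on every already-set entry (visit entries are write-once)
def VExt (a b : Array Int) : Prop :=
  ∀ j : Nat, j < 100001 → a.getD j 0 ≠ -1 → b.getD j 0 = a.getD j 0

theorem vext_trans {a b c : Array Int} (h1 : VExt a b) (h2 : VExt b c) : VExt a c := by
  intro j hj hne
  rw [h2 j hj (by rw [h1 j hj hne]; exact hne), h1 j hj hne]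

theorem size_aset (a : Array Int) (i : Int) (x : Int) : (aset a i x).size = a.size := by
  simp [aset]

theorem getD_aset (a : Array Int) (i : Int) (x : Int) (j : Nat) :
    (aset a i x).getD j 0 = if j = ixN i ∧ ixN i < a.size then x else a.getD j 0 := by
  unfold aset
  rw [Array.getD_eq_getD_getElem?, Array.getD_eq_getD_getElem?, Array.getElem?_setIfInBounds]
  by_cases he : ixN i = j
  · subst he
    by_cases hs : ixN i < a.size
    · simp [hs]
    · simp [hs]
  · rw [if_neg he, if_neg (by intro hc; exact he hc.1.symm)]

theorem aget_aset (a : Array Int) (i : Int) (x : Int) (w : Int) :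
    aget (aset a i x) w = if ixN w = ixN i ∧ ixN i < a.size then x else aget a w := by
  unfold aget; rw [getD_aset]

theorem ixN_lt {i : Int} (h1 : -100001 ≤ i) (h2 : i ≤ 100000) : ixN i < 100001 := by
  unfold ixN; split <;> omega

theorem getD_replicate (x : Int) (j : Nat) :
    (Array.replicate 100001 x).getD j 0 = if j < 100001 then x else 0 := by
  rw [Array.getD_eq_getD_getElem?]
  simp only [Array.getElem?_replicate]
  split <;> simp_all

theorem vext_step1 (v nv : Int) (s : Array Int × List Int) : VExt s.1 (step1 v nv s).1 := by
  unfold step1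
  split
  · rename_i h
    intro j hj hne
    rw [getD_aset]
    split
    · rename_i he
      exfalso
      have : s.1.getD (ixN nv) 0 = -1 := h.2.2
      rw [← he.1] at this; exact hne this
    · rfl
  · intro j hj hne; rfl

theorem vext_keep {a b : Array Int} (h : VExt a b) {w : Int}
    (h1 : -100001 ≤ w) (h2 : w ≤ 100000) (hne : aget a w ≠ -1) : aget b w ≠ -1 := by
  have heq := h (ixN w) (ixN_lt h1 h2) hne
  unfold aget at *
  rw [heq]; exact hne

theorem vext_eq {a b : Array Int} (h : VExt a b) {w : Int}
    (h1 : -100001 ≤ w) (h2 : w ≤ 100000) (hne : aget a w ≠ -1) : aget b w = aget a w := by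
  exact h (ixN w) (ixN_lt h1 h2) hne

theorem vext_loop1 (fuel : Nat) : ∀ (visit : Array Int) (f b acc : List Int),
    VExt visit (loop1 fuel visit f b acc).1 := by
  induction fuel with
  | zero => intro visit f b acc j hj hne; simp [loop1]
  | succ fuel ih =>
    intro visit f b acc
    cases f with
    | cons v f =>
      simp only [loop1]
      have h1 := vext_step1 v (v + 1) (visit, b)
      have h2 := vext_step1 v (v - 1) (step1 v (v + 1) (visit, b))
      have h3 := vext_step1 v (v + v) (step1 v (v - 1) (step1 v (v + 1) (visit, b)))
      exact vext_trans h1 (vext_trans h2 (vext_trans h3 (ih _ _ _ _)))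
    | nil =>
      cases b with
      | nil => intro j hj hne; simp [loop1]
      | cons x xs => simp only [loop1]; exact ih _ _ _ _

theorem loop1_acc (fuel : Nat) : ∀ (visit : Array Int) (f b acc : List Int),
    loop1 fuel visit f b acc
      = ((loop1 fuel visit f b []).1, acc.reverse ++ (loop1 fuel visit f b []).2) := by
  induction fuel with
  | zero => intro visit f b acc; simp [loop1]
  | succ fuel ih =>
    intro visit f b acc
    cases f with
    | cons v f =>
      simp only [loop1]
      rw [ih _ _ _ (v :: acc), ih _ _ _ [v]]
      simp
    | nil =>
      cases b with
      | nil => simp [loop1]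
      | cons x xs => simp only [loop1]; exact ih _ _ _ _

-- one neighbour micro-step: A's fused update = B's pass-1 update plus B's pass-2 update,
-- and all loop invariants are preserved
theorem micro (visitF : Array Int) (v i : Int) (visit cnt : Array Int) (back : List Int)
    (hsz : visit.size = 100001) (hcsz : cnt.size = 100001)
    (hge : ∀ j : Nat, j < 100001 → -1 ≤ visit.getD j 0)
    (hz : ∀ j : Nat, j < 100001 → visit.getD j 0 = -1 → cnt.getD j 0 = 0)
    (hv1 : -100001 ≤ v) (hv2 : v ≤ 100000)
    (hvis : aget visit v ≠ -1)
    (hext : VExt (step1 v (v + i) (visit, back)).1 visitF)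
    (hvF : aget visitF v = aget visit v) :
    stepA v i (visit, cnt, back)
        = ((step1 v (v + i) (visit, back)).1,
           step2 visitF v cnt (v + i),
           (step1 v (v + i) (visit, back)).2)
      ∧ (step1 v (v + i) (visit, back)).1.size = 100001
      ∧ (step2 visitF v cnt (v + i)).size = 100001
      ∧ (∀ j : Nat, j < 100001 → -1 ≤ (step1 v (v + i) (visit, back)).1.getD j 0)
      ∧ (∀ j : Nat, j < 100001 → (step1 v (v + i) (visit, back)).1.getD j 0 = -1 →
            (step2 visitF v cnt (v + i)).getD j 0 = 0)
      ∧ VExt visit (step1 v (v + i) (visit, back)).1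
      ∧ (∀ w ∈ (step1 v (v + i) (visit, back)).2,
            w ∈ back ∨ ((-100001 ≤ w ∧ w ≤ 100000) ∧ aget (step1 v (v + i) (visit, back)).1 w ≠ -1)) := by
  have hvlt : ixN v < 100001 := ixN_lt hv1 hv2
  have hd0 : 0 ≤ aget visit v := by
    have := hge (ixN v) hvlt
    have h2 : aget visit v ≠ -1 := hvis
    unfold aget at h2 ⊢; omega
  by_cases hr : 0 ≤ v + i ∧ v + i ≤ 100000
  · -- in range
    have hnlt : ixN (v + i) < 100001 := ixN_lt (by omega) (by omega)
    have hnsz : ixN (v + i) < visit.size := by omega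
    by_cases hm : aget visit (v + i) = -1
    · -- discovery
      have hstep1 : step1 v (v + i) (visit, back)
          = (aset visit (v + i) (aget visit v + 1), (v + i) :: back) := by
        unfold step1; rw [if_pos ⟨hr.1, hr.2, hm⟩]
      have hA : stepA v i (visit, cnt, back)
          = (aset visit (v + i) (aget visit v + 1), aset cnt (v + i) (aget cnt v), (v + i) :: back) := by
        unfold stepA
        rw [if_neg (by omega), if_pos hm]
      have hget1 : aget (aset visit (v + i) (aget visit v + 1)) (v + i) = aget visit v + 1 := by
        rw [aget_aset, if_pos ⟨rfl, hnsz⟩]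
      have hvF' : aget visitF (v + i) = aget visit v + 1 := by
        have := hext (ixN (v + i)) hnlt (by
          rw [hstep1]
          show (aset visit (v + i) (aget visit v + 1)).getD (ixN (v + i)) 0 ≠ -1
          have : (aset visit (v + i) (aget visit v + 1)).getD (ixN (v + i)) 0 = aget visit v + 1 := hget1
          omega)
        rw [hstep1] at this
        show visitF.getD (ixN (v + i)) 0 = _
        rw [this]; exact hget1
      have hstep2 : step2 visitF v cnt (v + i) = aset cnt (v + i) (aget cnt v) := by
        unfold step2
        rw [if_pos ⟨hr.1, hr.2, by rw [hvF', hvF]⟩]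
        have hc0 : aget cnt (v + i) = 0 := hz (ixN (v + i)) hnlt hm
        rw [hc0, zero_add]
      refine ⟨?_, ?_, ?_, ?_, ?_, ?_, ?_⟩
      · rw [hA, hstep1, hstep2]
      · rw [hstep1]; simp [size_aset, hsz]
      · rw [hstep2]; simp [size_aset, hcsz]
      · intro j hj; rw [hstep1]
        show -1 ≤ (aset visit (v + i) (aget visit v + 1)).getD j 0
        rw [getD_aset]; split
        · omega
        · exact hge j hj
      · intro j hj hvj
        rw [hstep1] at hvj; rw [hstep2]
        show (aset cnt (v + i) (aget cnt v)).getD j 0 = 0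
        replace hvj : (aset visit (v + i) (aget visit v + 1)).getD j 0 = -1 := hvj
        rw [getD_aset] at hvj
        rw [getD_aset]
        by_cases hje : j = ixN (v + i) ∧ ixN (v + i) < cnt.size
        · exfalso; rw [if_pos ⟨hje.1, by omega⟩] at hvj; omega
        · rw [if_neg hje]
          apply hz j hj
          rcases (not_and_or.mp hje) with h | h
          · rw [if_neg (by intro hc; exact h hc.1)] at hvj; exact hvj
          · omega
      · rw [hstep1]
        intro j hj hne
        show (aset visit (v + i) (aget visit v + 1)).getD j 0 = _
        rw [getD_aset]
        split
        · rename_i hc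
          exfalso; apply hne
          have : aget visit (v + i) = visit.getD j 0 := by unfold aget; rw [hc.1]
          rw [← this]; exact hm
        · rfl
      · rw [hstep1]
        intro w hw
        rcases List.mem_cons.mp hw with hw | hw
        · right
          subst hw
          refine ⟨⟨by omega, by omega⟩, ?_⟩
          rw [hget1]; omega
        · left; exact hw
    · -- already visited
      have hstep1 : step1 v (v + i) (visit, back) = (visit, back) := by
        unfold step1; rw [if_neg (by intro hc; exact hm hc.2.2)]
      have hextv : VExt visit visitF := by rw [hstep1] at hext; exact hext
      have hvFn : aget visitF (v + i) = aget visit (v + i) := hextv (ixN (v + i)) hnlt hm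
      by_cases he : aget visit (v + i) = aget visit v + 1
      · -- elif branch
        have hA : stepA v i (visit, cnt, back)
            = (visit, aset cnt (v + i) (aget cnt (v + i) + aget cnt v), back) := by
          unfold stepA
          rw [if_neg (by omega), if_neg hm, if_pos he]
        have hstep2 : step2 visitF v cnt (v + i)
            = aset cnt (v + i) (aget cnt (v + i) + aget cnt v) := by
          unfold step2
          rw [if_pos ⟨hr.1, hr.2, by rw [hvFn, hvF, he]⟩]
        refine ⟨by rw [hA, hstep1, hstep2], by rw [hstep1]; exact hsz,
          by rw [hstep2]; simp [size_aset, hcsz], by rw [hstep1]; exact hge, ?_,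
          by rw [hstep1]; intro j hj hne; rfl,
          by rw [hstep1]; intro w hw; left; exact hw⟩
        intro j hj hvj
        rw [hstep1] at hvj; rw [hstep2]
        show (aset cnt (v + i) (aget cnt (v + i) + aget cnt v)).getD j 0 = 0
        rw [getD_aset]
        split
        · rename_i hc
          exfalso
          have : aget visit (v + i) = visit.getD j 0 := by unfold aget; rw [hc.1]
          rw [this, hvj] at hm; exact hm rfl
        · exact hz j hj hvj
      · -- else: nothing happens
        have hA : stepA v i (visit, cnt, back) = (visit, cnt, back) := by
          unfold stepA
          rw [if_neg (by omega), if_neg hm, if_neg he]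
        have hstep2 : step2 visitF v cnt (v + i) = cnt := by
          unfold step2
          rw [if_neg (by intro hc; exact he (by rw [← hvF, ← hvFn]; exact hc.2.2))]
        exact ⟨by rw [hA, hstep1, hstep2], by rw [hstep1]; exact hsz,
          by rw [hstep2]; exact hcsz, by rw [hstep1]; exact hge,
          by rw [hstep1, hstep2]; exact hz,
          by rw [hstep1]; intro j hj hne; rfl,
          by rw [hstep1]; intro w hw; left; exact hw⟩
  · -- out of range
    have hstep1 : step1 v (v + i) (visit, back) = (visit, back) := by
      unfold step1; rw [if_neg (by intro hc; exact hr ⟨hc.1, hc.2.1⟩)]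
    have hstep2 : step2 visitF v cnt (v + i) = cnt := by
      unfold step2; rw [if_neg (by intro hc; exact hr ⟨hc.1, hc.2.1⟩)]
    have hA : stepA v i (visit, cnt, back) = (visit, cnt, back) := by
      unfold stepA; rw [if_pos (by omega)]
    exact ⟨by rw [hA, hstep1, hstep2], by rw [hstep1]; exact hsz,
      by rw [hstep2]; exact hcsz, by rw [hstep1]; exact hge,
      by rw [hstep1, hstep2]; exact hz,
      by rw [hstep1]; intro j hj hne; rfl,
      by rw [hstep1]; intro w hw; left; exact hw⟩

theorem main_lemma (fuel : Nat) : ∀ (visit cnt : Array Int) (f b : List Int),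
    visit.size = 100001 → cnt.size = 100001 →
    (∀ j : Nat, j < 100001 → -1 ≤ visit.getD j 0) →
    (∀ j : Nat, j < 100001 → visit.getD j 0 = -1 → cnt.getD j 0 = 0) →
    (∀ w ∈ f, (-100001 ≤ w ∧ w ≤ 100000) ∧ aget visit w ≠ -1) →
    (∀ w ∈ b, (-100001 ≤ w ∧ w ≤ 100000) ∧ aget visit w ≠ -1) →
    loopA fuel visit cnt f b
      = ((loop1 fuel visit f b []).1,
         pass2 (loop1 fuel visit f b []).1 cnt (loop1 fuel visit f b []).2) := by
  induction fuel with
  | zero => intro visit cnt f b _ _ _ _ _ _; simp [loopA, loop1, pass2]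
  | succ fuel ih =>
    intro visit cnt f b hsz hcsz hge hz hf hb
    cases f with
    | nil =>
      cases b with
      | nil => simp [loopA, loop1, pass2]
      | cons x xs =>
        simp only [loopA, loop1]
        exact ih visit cnt (x :: xs).reverse [] hsz hcsz hge hz
          (fun w hw => hb w (List.mem_reverse.mp hw)) (by intro w hw; simp at hw)
    | cons v f =>
      obtain ⟨⟨hv1, hv2⟩, hvis⟩ := hf v List.mem_cons_self
      simp only [loopA, loop1]
      -- extension facts towards the final visit table of this iteration
      have E1 := vext_step1 v (v + 1) (visit, b)
      have E2 := vext_step1 v (v - 1) (step1 v (v + 1) (visit, b))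
      have E3 := vext_step1 v (v + v) (step1 v (v - 1) (step1 v (v + 1) (visit, b)))
      have EX := vext_loop1 fuel
        (step1 v (v + v) (step1 v (v - 1) (step1 v (v + 1) (visit, b)))).1 f
        (step1 v (v + v) (step1 v (v - 1) (step1 v (v + 1) (visit, b)))).2 []
      have E3X := vext_trans E3 EX
      have E2X := vext_trans E2 E3X
      have E1X := vext_trans E1 E2X
      have harith : (v : Int) + -1 = v - 1 := by ring
      have hvF0 : aget (loop1 fuel
          (step1 v (v + v) (step1 v (v - 1) (step1 v (v + 1) (visit, b)))).1 f
          (step1 v (v + v) (step1 v (v - 1) (step1 v (v + 1) (visit, b)))).2 []).1 v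
          = aget visit v := vext_eq E1X hv1 hv2 hvis
      obtain ⟨e1, sz1, szc1, ge1, z1, F1, q1⟩ :=
        micro _ v 1 visit cnt b hsz hcsz hge hz hv1 hv2 hvis E2X hvF0
      have hvis1 := vext_keep F1 hv1 hv2 hvis
      have hvF1 : aget (loop1 fuel
          (step1 v (v + v) (step1 v (v - 1) (step1 v (v + 1) (visit, b)))).1 f
          (step1 v (v + v) (step1 v (v - 1) (step1 v (v + 1) (visit, b)))).2 []).1 v
          = aget (step1 v (v + 1) (visit, b)).1 v := by
        rw [vext_eq F1 hv1 hv2 hvis]; exact hvF0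
      obtain ⟨e2, sz2, szc2, ge2, z2, F2, q2⟩ :=
        micro (loop1 fuel
        (step1 v (v + v) (step1 v (v - 1) (step1 v (v + 1) (visit, b)))).1 f
        (step1 v (v + v) (step1 v (v - 1) (step1 v (v + 1) (visit, b)))).2 []).1
        v (-1) (step1 v (v + 1) (visit, b)).1 (step2 (loop1 fuel
        (step1 v (v + v) (step1 v (v - 1) (step1 v (v + 1) (visit, b)))).1 f
        (step1 v (v + v) (step1 v (v - 1) (step1 v (v + 1) (visit, b)))).2 []).1 v cnt (v + 1))
          (step1 v (v + 1) (visit, b)).2 sz1 szc1 ge1 z1 hv1 hv2 hvis1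
          (by rw [harith]; exact E3X) hvF1
      rw [harith] at e2 sz2 szc2 ge2 z2 F2 q2
      simp only [Prod.mk.eta] at e2 sz2 szc2 ge2 z2 F2 q2
      have hvis2 := vext_keep F2 hv1 hv2 hvis1
      have hvF2 : aget (loop1 fuel
          (step1 v (v + v) (step1 v (v - 1) (step1 v (v + 1) (visit, b)))).1 f
          (step1 v (v + v) (step1 v (v - 1) (step1 v (v + 1) (visit, b)))).2 []).1 v
          = aget (step1 v (v - 1) (step1 v (v + 1) (visit, b))).1 v := by
        rw [vext_eq F2 hv1 hv2 hvis1]; exact hvF1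
      obtain ⟨e3, sz3, szc3, ge3, z3, F3, q3⟩ :=
        micro (loop1 fuel
        (step1 v (v + v) (step1 v (v - 1) (step1 v (v + 1) (visit, b)))).1 f
        (step1 v (v + v) (step1 v (v - 1) (step1 v (v + 1) (visit, b)))).2 []).1
        v v (step1 v (v - 1) (step1 v (v + 1) (visit, b))).1
          (step2 (loop1 fuel
        (step1 v (v + v) (step1 v (v - 1) (step1 v (v + 1) (visit, b)))).1 f
        (step1 v (v + v) (step1 v (v - 1) (step1 v (v + 1) (visit, b)))).2 []).1 v (step2 (loop1 fuel
        (step1 v (v + v) (step1 v (v - 1) (step1 v (v + 1) (visit, b)))).1 f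
        (step1 v (v + v) (step1 v (v - 1) (step1 v (v + 1) (visit, b)))).2 []).1 v cnt (v + 1)) (v - 1))
          (step1 v (v - 1) (step1 v (v + 1) (visit, b))).2 sz2 szc2 ge2 z2 hv1 hv2 hvis2
          EX hvF2
      simp only [Prod.mk.eta] at e3 sz3 szc3 ge3 z3 F3 q3
      have F13 : VExt visit
          (step1 v (v + v) (step1 v (v - 1) (step1 v (v + 1) (visit, b)))).1 :=
        vext_trans F1 (vext_trans F2 F3)
      -- queue invariants for the recursive call
      have Qf : ∀ w ∈ f, ((-100001 ≤ w ∧ w ≤ 100000) ∧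
          aget (step1 v (v + v) (step1 v (v - 1) (step1 v (v + 1) (visit, b)))).1 w ≠ -1) := by
        intro w hw
        obtain ⟨hr, hn⟩ := hf w (List.mem_cons_of_mem _ hw)
        exact ⟨hr, vext_keep F13 hr.1 hr.2 hn⟩
      have Qb : ∀ w ∈ (step1 v (v + v) (step1 v (v - 1) (step1 v (v + 1) (visit, b)))).2,
          ((-100001 ≤ w ∧ w ≤ 100000) ∧
          aget (step1 v (v + v) (step1 v (v - 1) (step1 v (v + 1) (visit, b)))).1 w ≠ -1) := by
        intro w hw
        rcases q3 w hw with hw2 | hnew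
        · rcases q2 w hw2 with hw1 | hnew
          · rcases q1 w hw1 with hwb | hnew
            · obtain ⟨hr, hn⟩ := hb w hwb
              exact ⟨hr, vext_keep F13 hr.1 hr.2 hn⟩
            · obtain ⟨hr, hn⟩ := hnew
              exact ⟨hr, vext_keep (vext_trans F2 F3) hr.1 hr.2 hn⟩
          · obtain ⟨hr, hn⟩ := hnew
            exact ⟨hr, vext_keep F3 hr.1 hr.2 hn⟩
        · exact hnew
      -- rewrite A's fused step into B's two components
      have eT : stepA v v (stepA v (-1) (stepA v 1 (visit, cnt, b)))
          = ((step1 v (v + v) (step1 v (v - 1) (step1 v (v + 1) (visit, b)))).1,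
             step2 (loop1 fuel
               (step1 v (v + v) (step1 v (v - 1) (step1 v (v + 1) (visit, b)))).1 f
               (step1 v (v + v) (step1 v (v - 1) (step1 v (v + 1) (visit, b)))).2 []).1 v
               (step2 (loop1 fuel
        (step1 v (v + v) (step1 v (v - 1) (step1 v (v + 1) (visit, b)))).1 f
        (step1 v (v + v) (step1 v (v - 1) (step1 v (v + 1) (visit, b)))).2 []).1 v (step2 (loop1 fuel
        (step1 v (v + v) (step1 v (v - 1) (step1 v (v + 1) (visit, b)))).1 f
        (step1 v (v + v) (step1 v (v - 1) (step1 v (v + 1) (visit, b)))).2 []).1 v cnt (v + 1)) (v - 1)) (v + v),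
             (step1 v (v + v) (step1 v (v - 1) (step1 v (v + 1) (visit, b)))).2) := by
        rw [e1, e2, e3]
      rw [eT]
      rw [ih _ _ f _ sz3 szc3 ge3 z3 Qf Qb]
      rw [loop1_acc fuel
        (step1 v (v + v) (step1 v (v - 1) (step1 v (v + 1) (visit, b)))).1 f
        (step1 v (v + v) (step1 v (v - 1) (step1 v (v + 1) (visit, b)))).2 [v]]
      simp only [List.reverse_cons, List.reverse_nil, List.nil_append, List.cons_append]
      simp only [pass2, List.foldl_cons]

-- ===== VERDICT (by name: the statement is the Claim_ definition above) =====
theorem bfs_spec : Claim_equal_bfs := by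
  intro st ed hdom hpre
  obtain ⟨h1, h2, h3, h4⟩ := hpre
  have hstlt : ixN st < 100001 := ixN_lt h1 h2
  show bfs st ed = bfs_alt st ed
  simp only [bfs, bfs_alt]
  have hsz : (aset (Array.replicate 100001 (-1)) st 0).size = 100001 := by
    simp [size_aset]
  have hcsz : (aset (Array.replicate 100001 0) st 1).size = 100001 := by
    simp [size_aset]
  have hge : ∀ j : Nat, j < 100001 → -1 ≤ (aset (Array.replicate 100001 (-1)) st 0).getD j 0 := by
    intro j hj
    rw [getD_aset]
    split
    · omega
    · rw [getD_replicate, if_pos hj]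
  have hz : ∀ j : Nat, j < 100001 → (aset (Array.replicate 100001 (-1)) st 0).getD j 0 = -1 →
      (aset (Array.replicate 100001 0) st 1).getD j 0 = 0 := by
    intro j hj hv
    rw [getD_aset] at hv
    rw [getD_aset]
    by_cases hje : j = ixN st
    · exfalso
      rw [if_pos ⟨hje, by rw [Array.size_replicate]; exact hstlt⟩] at hv
      omega
    · rw [if_neg (by intro hc; exact hje hc.1), getD_replicate, if_pos hj]
  have hf : ∀ w ∈ [st], ((-100001 ≤ w ∧ w ≤ 100000) ∧
      aget (aset (Array.replicate 100001 (-1)) st 0) w ≠ -1) := by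
    intro w hw
    rcases List.mem_singleton.mp hw with rfl
    refine ⟨⟨h1, h2⟩, ?_⟩
    rw [aget_aset, if_pos ⟨rfl, by rw [Array.size_replicate]; exact hstlt⟩]
    omega
  have hb : ∀ w ∈ ([] : List Int), ((-100001 ≤ w ∧ w ≤ 100000) ∧
      aget (aset (Array.replicate 100001 (-1)) st 0) w ≠ -1) := by
    intro w hw; simp at hw
  rw [main_lemma 1000000 _ _ [st] [] hsz hcsz hge hz hf hb]
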